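-- pv_equiv track=rewrite | github.com/concomberjvck/practice | bot .py | aleut_translator
-- ===== SOURCE A (Python) =====
-- def to_str(list):
--     string = ''
--     for i in list:
--         string += i + ' '
--     return string.strip()
--
-- def aleut_translator(db, sequence):
--     ans = {}
--     if sequence in db.keys():
--         return {sequence : db[sequence]}
--     else:
--         words = sequence.split(' ')
--         length = len(words)
--         for i in range(length):
--             for j in reversed(range(i, length + 1)):
--                 skey = to_str(words[i:j])
--                 if skey in db.keys():
--                     ans.update({ skey : db[skey]})
--         return ans
-- ===== SOURCE B (Python) =====
-- # Same result as A, but builds each phrase incrementally per start index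
-- # (one ascending pass over end positions) instead of re-joining every slice
-- # from scratch; each start's matches are emitted in reverse to preserve A's
-- # longest-first insertion order.
-- def aleut_translator(db, sequence):
--     if sequence in db:
--         return {sequence: db[sequence]}
--     words = sequence.split(' ')
--     n = len(words)
--     ans = {}
--     for i in range(n):
--         joined = ''
--         hits = []
--         for e in range(i, n + 1):
--             if e > i:
--                 joined = words[i] if e == i + 1 else joined + ' ' + words[e - 1]
--             key = joined.strip()
--             if key in db:
--                 hits.append(key)
--         for key in reversed(hits):
--             ans[key] = db[key]
--     return ans
-- ===== Notes on version B (the rewrite author's own statement) =====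
-- stated objective: alternative
-- what changed: Instead of re-joining every slice words[i:j] from scratch inside the doubly nested loop, B builds each phrase incrementally per start index in one ascending pass over end positions and then emits that start's matches in reverse, preserving A's longest-first insertion order; it trades A's per-pair join for incremental concatenation.
import Mathlib
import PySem

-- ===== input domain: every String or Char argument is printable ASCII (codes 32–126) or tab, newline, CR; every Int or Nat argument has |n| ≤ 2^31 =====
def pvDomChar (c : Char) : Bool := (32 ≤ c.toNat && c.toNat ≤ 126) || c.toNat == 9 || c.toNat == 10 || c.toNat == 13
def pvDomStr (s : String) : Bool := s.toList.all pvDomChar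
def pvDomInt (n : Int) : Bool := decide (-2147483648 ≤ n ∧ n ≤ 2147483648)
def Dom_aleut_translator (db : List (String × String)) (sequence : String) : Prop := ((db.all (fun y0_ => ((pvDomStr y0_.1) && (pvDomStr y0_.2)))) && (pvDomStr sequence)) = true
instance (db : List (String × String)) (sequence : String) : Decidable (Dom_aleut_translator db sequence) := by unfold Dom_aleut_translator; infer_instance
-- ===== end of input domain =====

-- B rebuilds each candidate phrase incrementally per start index (one pass over ends,
-- then reversed to keep A's longest-first insertion order) instead of re-joining every
-- slice from scratch; same return value, return-value equivalence proved below.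

-- ===== PORT A =====
def pvToStr (l : List String) : String :=
  PySem.Str.strip (l.foldl (fun s w => s ++ w ++ " ") "")

def aleut_translator (db : List (String × String)) (sequence : String) : List (String × String) :=
  let d := PySem.Dict.ofList db
  if d.contains sequence then
    ((PySem.Dict.empty : PySem.Dict String String).insert sequence (d.getD sequence "")).items
  else
    let words := (PySem.Str.split? sequence " ").getD []
    let length : Int := words.length
    let ans := (PySem.List.pyRange 0 length).foldl (fun ans i =>
      ((PySem.List.pyRange i (length + 1)).reverse).foldl (fun ans j =>
        let skey := pvToStr (PySem.List.slice words (some i) (some j))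
        if d.contains skey then ans.insert skey (d.getD skey "") else ans) ans)
      (PySem.Dict.empty : PySem.Dict String String)
    ans.items

-- ===== PORT B =====
def aleut_translator_alt (db : List (String × String)) (sequence : String) : List (String × String) :=
  let d := PySem.Dict.ofList db
  if d.contains sequence then
    ((PySem.Dict.empty : PySem.Dict String String).insert sequence (d.getD sequence "")).items
  else
    let words := (PySem.Str.split? sequence " ").getD []
    let n : Int := words.length
    let ans := (PySem.List.pyRange 0 n).foldl (fun ans i =>
      let ph := (PySem.List.pyRange i (n + 1)).foldl (fun (ph : String × List String) e =>
        let joined := if i < e then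
            (if e == i + 1 then PySem.List.pyGetD words i ""
             else ph.1 ++ " " ++ PySem.List.pyGetD words (e - 1) "")
          else ph.1
        let key := PySem.Str.strip joined
        if d.contains key then (joined, ph.2 ++ [key]) else (joined, ph.2)) ("", ([] : List String))
      ph.2.reverse.foldl (fun ans key => ans.insert key (d.getD key "")) ans)
      (PySem.Dict.empty : PySem.Dict String String)
    ans.items

-- ===== PRECONDITION & SPEC =====
def Spec_aleut_translator (db : List (String × String)) (sequence : String) (out : List (String × String)) : Prop := out = aleut_translator_alt db sequence
instance (db : List (String × String)) (sequence : String) (out : List (String × String)) : Decidable (Spec_aleut_translator db sequence out) := by unfold Spec_aleut_translator; infer_instance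

-- ===== CLAIM (what is proved, stated in full; the proofs are below) =====
def Claim_equal_aleut_translator : Prop := ∀ (db : List (String × String)) (sequence : String), Dom_aleut_translator db sequence → Spec_aleut_translator db sequence (aleut_translator db sequence)

-- ===== LEMMAS AND PROOFS =====

-- the incremental join B maintains: "" for [], else words joined by single spaces
def pvJoin : List String → String
  | [] => ""
  | w :: t => t.foldl (fun s w' => s ++ " " ++ w') w

lemma pvJoin_append (l : List String) (w : String) :
    pvJoin (l ++ [w]) = if l = [] then w else pvJoin l ++ " " ++ w := by
  cases l with
  | nil => simp [pvJoin]
  | cons a t => simp [pvJoin, List.foldl_append]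

lemma rawA_eq (l : List String) :
    l.foldl (fun s w => s ++ w ++ " ") "" = if l = [] then "" else pvJoin l ++ " " := by
  induction l using List.reverseRecOn with
  | nil => simp
  | append_singleton l w ih =>
    rw [List.foldl_append, ih, pvJoin_append]
    by_cases h : l = [] <;> simp [h, String.append_assoc]

lemma strip_append_space (s : String) : PySem.Str.strip (s ++ " ") = PySem.Str.strip s := by
  unfold PySem.Str.strip PySem.Chars.strip PySem.Chars.lstrip PySem.Chars.rstrip
  have hsp : PySem.Chars.isspace ' ' = true := by decide
  rcases h : List.dropWhile PySem.Chars.isspace s.toList with _ | ⟨c, t⟩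
  · simp [List.dropWhile_append, h, hsp]
  · simp [List.dropWhile_append, h, hsp]

lemma pvToStr_eq (l : List String) : pvToStr l = PySem.Str.strip (pvJoin l) := by
  unfold pvToStr
  rw [rawA_eq]
  by_cases h : l = []
  · simp [h, pvJoin]
  · simp [h, strip_append_space]

-- a guarded fold is a fold over the filtered mapped list
lemma foldl_ifmem {α γ : Type} (p : String → Bool) (g : γ → String → γ) (f : α → String) :
    ∀ (L : List α) (a : γ),
      L.foldl (fun a x => if p (f x) then g a (f x) else a) a
        = ((L.map f).filter p).foldl g a := by
  intro L
  induction L with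
  | nil => intro a; simp
  | cons x t ih =>
    intro a
    by_cases h : p (f x) <;> simp [h, ih]

-- characterisation of B's inner incremental fold
lemma innerB_eq (d : PySem.Dict String String) (words : List String) (iN m : Nat)
    (h1 : iN ≤ m) (h2 : m ≤ words.length) :
    (PySem.List.pyRange (iN : Int) ((m : Int) + 1)).foldl (fun (ph : String × List String) e =>
        let joined := if (iN : Int) < e then
            (if e == (iN : Int) + 1 then PySem.List.pyGetD words (iN : Int) ""
             else ph.1 ++ " " ++ PySem.List.pyGetD words (e - 1) "")
          else ph.1
        let key := PySem.Str.strip joined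
        if d.contains key then (joined, ph.2 ++ [key]) else (joined, ph.2)) ("", ([] : List String))
      = (pvJoin ((words.drop iN).take (m - iN)),
         ((PySem.List.pyRange (iN : Int) ((m : Int) + 1)).map
             (fun j => PySem.Str.strip (pvJoin (PySem.List.slice words (some (iN : Int)) (some j))))).filter
           (fun s => d.contains s)) := by
  revert h2
  induction m, h1 using Nat.le_induction with
  | base =>
    intro h2
    rw [PySem.List.pyRange_one_singleton]
    have hs : PySem.List.slice words (some (iN : Int)) (some (iN : Int)) = [] := by
      rw [PySem.List.slice_natCast]; simp
    simp [hs, pvJoin]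
    by_cases hp : d.contains (PySem.Str.strip "") <;> simp [hp, List.filter]
  | succ m hm ih =>
    intro h2
    have hmlt : m < words.length := by omega
    have ihh := ih (by omega)
    have hub : ((m + 1 : Nat) : Int) + 1 = ((m : Int) + 1) + 1 := by push_cast; ring
    rw [hub, PySem.List.pyRange_one_succ_right (by exact_mod_cast by omega : (iN : Int) ≤ (m : Int) + 1),
        List.foldl_append, List.map_append, List.filter_append, ihh]
    have hgd : words[m]? = some (words.getD m "") := by
      simp [List.getD, List.getElem?_eq_getElem hmlt]
    have hseg : (words.drop iN).take (m + 1 - iN) = (words.drop iN).take (m - iN) ++ [words.getD m ""] := by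
      have : m + 1 - iN = (m - iN) + 1 := by omega
      rw [this, List.take_add_one, List.getElem?_drop]
      have : iN + (m - iN) = m := by omega
      rw [this, hgd]
      simp
    have hslice : PySem.List.slice words (some (iN : Int)) (some ((m : Int) + 1))
        = (words.drop iN).take (m + 1 - iN) := by
      have : ((m : Int) + 1) = ((m + 1 : Nat) : Int) := by push_cast; ring
      rw [this, PySem.List.slice_natCast]
    have hjoined : (if (iN : Int) < (m : Int) + 1 then
          (if ((m : Int) + 1) == (iN : Int) + 1 then PySem.List.pyGetD words (iN : Int) ""
           else pvJoin ((words.drop iN).take (m - iN)) ++ " " ++ PySem.List.pyGetD words ((m : Int) + 1 - 1) "")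
        else pvJoin ((words.drop iN).take (m - iN)))
        = pvJoin ((words.drop iN).take (m + 1 - iN)) := by
      rw [if_pos (by omega)]
      by_cases hmi : m = iN
      · subst hmi
        have h0 : m - m = 0 := by omega
        rw [if_pos (by simp), hseg, h0]
        simp [pvJoin, PySem.List.pyGetD_natCast, List.getD]
      · have hne : (((m : Int) + 1) == (iN : Int) + 1) = false := by
          simp only [beq_eq_false_iff_ne, ne_eq]
          intro h; apply hmi; omega
        rw [hne, if_neg (by simp), hseg]
        have hnn : (words.drop iN).take (m - iN) ≠ [] := by
          have hlen : ((words.drop iN).take (m - iN)).length = m - iN := by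
            simp [List.length_take, List.length_drop]; omega
          intro h; rw [h] at hlen; simp at hlen; omega
        rw [pvJoin_append, if_neg hnn]
        have : ((m : Int) + 1 - 1) = ((m : Nat) : Int) := by ring
        rw [this, PySem.List.pyGetD_natCast]
    simp only [List.foldl_cons, List.foldl_nil, List.map_cons, List.map_nil]
    rw [hjoined, hslice]
    by_cases hp : d.contains (PySem.Str.strip (pvJoin ((words.drop iN).take (m + 1 - iN)))) <;>
      simp [hp, List.filter]

-- the per-start-index bodies of the two outer loops agree
lemma body_eq (d : PySem.Dict String String) (words : List String) (iN : Nat)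
    (hlt : iN < words.length) (ans : PySem.Dict String String) :
    ((PySem.List.pyRange (iN : Int) ((words.length : Int) + 1)).reverse).foldl (fun ans j =>
        let skey := pvToStr (PySem.List.slice words (some (iN : Int)) (some j))
        if d.contains skey then ans.insert skey (d.getD skey "") else ans) ans
      = (let ph := (PySem.List.pyRange (iN : Int) ((words.length : Int) + 1)).foldl
            (fun (ph : String × List String) e =>
              let joined := if (iN : Int) < e then
                  (if e == (iN : Int) + 1 then PySem.List.pyGetD words (iN : Int) ""
                   else ph.1 ++ " " ++ PySem.List.pyGetD words (e - 1) "")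
                else ph.1
              let key := PySem.Str.strip joined
              if d.contains key then (joined, ph.2 ++ [key]) else (joined, ph.2)) ("", ([] : List String))
         ph.2.reverse.foldl (fun ans key => ans.insert key (d.getD key "")) ans) := by
  rw [innerB_eq d words iN words.length (le_of_lt hlt) le_rfl]
  dsimp only
  rw [foldl_ifmem (fun s => d.contains s)
      (fun (ans : PySem.Dict String String) key => ans.insert key (d.getD key ""))
      (fun j => pvToStr (PySem.List.slice words (some (iN : Int)) (some j)))
      ((PySem.List.pyRange (iN : Int) ((words.length : Int) + 1)).reverse) ans]
  have hf : (fun j => pvToStr (PySem.List.slice words (some (iN : Int)) (some j)))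
      = (fun j => PySem.Str.strip (pvJoin (PySem.List.slice words (some (iN : Int)) (some j)))) := by
    funext j; exact pvToStr_eq _
  rw [hf, List.map_reverse, List.filter_reverse]


-- ===== VERDICT (by name: the statement is the Claim_ definition above) =====
theorem aleut_translator_spec : Claim_equal_aleut_translator := by
  intro db sequence _
  unfold Spec_aleut_translator aleut_translator aleut_translator_alt
  by_cases hc : (PySem.Dict.ofList db).contains sequence
  · simp only [hc, if_true]
  · simp only [hc]
    refine congrArg PySem.Dict.items ?_
    apply PySem.List.foldl_congr_mem
    intro ans i hi
    rw [PySem.List.mem_pyRange_one] at hi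
    obtain ⟨iN, rfl⟩ := Int.eq_ofNat_of_zero_le hi.1
    have hlt : iN < ((PySem.Str.split? sequence " ").getD []).length := by exact_mod_cast hi.2
    exact body_eq _ _ iN hlt ans
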